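-- pv_equiv track=rewrite | github.com/Igorrafael90/sy_hospitalar | utils/validator.py | validate_crm
-- ===== SOURCE A (Python) =====
-- def validate_crm(crm: str):
--     # Mask ->  xxxx/UF
--     if len(crm) != 7:
--         return False
--
--     for i in range(len(crm)):
--         if i < 4 and not crm[i].isdigit():
--             return False
--         if i == 4 and crm[i] != '/':
--             return False
--         if i > 4 and not crm[i].isalpha():
--             return False
--
--     if not validate_uf(f'{crm[5]}{crm[6]}'):
--         return False
--
--     return True
--
-- def validate_uf(uf: str):
--     estados = ['AC', 'AL', 'AP', 'AM', 'BA', 'CE',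
--                'ES', 'GO', 'MA', 'MT', 'MS', 'MG',
--                'PA', 'PB', 'PR', 'PE', 'PI', 'RJ',
--                'RN', 'RS', 'RO', 'RR', 'SC', 'SP',
--                'SE', 'TO', 'DF']
--
--     return uf.upper() in estados
-- ===== SOURCE B (Python) =====
-- _UFS = {'AC', 'AL', 'AP', 'AM', 'BA', 'CE',
--         'ES', 'GO', 'MA', 'MT', 'MS', 'MG',
--         'PA', 'PB', 'PR', 'PE', 'PI', 'RJ',
--         'RN', 'RS', 'RO', 'RR', 'SC', 'SP',
--         'SE', 'TO', 'DF'}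
--
-- def validate_uf(uf: str):
--     return uf.upper() in _UFS
--
-- def validate_crm(crm: str):
--     # Parse at the first slash instead of scanning positions: the number part must be
--     # 4 digits, and UF membership alone subsumes the length-7 and isalpha checks
--     # (every state code is exactly two letters, so crm needs no separate length test).
--     num, sep, uf = crm.partition('/')
--     return sep == '/' and len(num) == 4 and num.isdigit() and validate_uf(uf)
-- ===== Notes on version B (the rewrite author's own statement) =====
-- stated objective: idiomatic
-- what changed: B parses the string with str.partition at the slash separator into number/separator/suffix and validates the parts (4-digit number, UF membership), instead of A's indexed loop with i<4/i==4/i>4 branches; B has no length-7 test and no isalpha test, both being subsumed by the part-length and UF-membership checks.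
import Mathlib
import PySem

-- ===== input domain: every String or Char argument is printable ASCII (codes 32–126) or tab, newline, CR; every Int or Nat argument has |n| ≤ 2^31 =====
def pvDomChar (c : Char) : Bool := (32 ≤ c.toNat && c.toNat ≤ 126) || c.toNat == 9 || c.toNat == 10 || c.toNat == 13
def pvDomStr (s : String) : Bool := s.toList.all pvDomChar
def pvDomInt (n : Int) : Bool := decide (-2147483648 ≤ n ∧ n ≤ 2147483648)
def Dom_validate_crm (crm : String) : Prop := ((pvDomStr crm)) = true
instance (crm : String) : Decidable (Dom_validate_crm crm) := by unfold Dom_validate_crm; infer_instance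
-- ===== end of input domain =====

-- B parses the string with partition at the slash separator and validates the parts (4-digit number,
-- UF membership, which subsumes the length-7 and isalpha checks), instead of A's
-- indexed loop with i<4/i==4/i>4 branches; same values, no speed claim.

-- ===== PORT A =====
def estados_a : List (List Char) :=
  ["AC".toList, "AL".toList, "AP".toList, "AM".toList, "BA".toList, "CE".toList,
   "ES".toList, "GO".toList, "MA".toList, "MT".toList, "MS".toList, "MG".toList,
   "PA".toList, "PB".toList, "PR".toList, "PE".toList, "PI".toList, "RJ".toList,
   "RN".toList, "RS".toList, "RO".toList, "RR".toList, "SC".toList, "SP".toList,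
   "SE".toList, "TO".toList, "DF".toList]

def validate_uf_a (uf : List Char) : Bool :=
  estados_a.contains (PySem.Chars.upper uf)

-- A's for-loop over range(len(crm)); `false` on an early `return False`.
def crmLoop (s : List Char) : List Int → Bool
  | [] => true
  | i :: rest =>
    match PySem.List.pyGet? s i with
    | none => false   -- unreachable: i ranges over range(len(s))
    | some c =>
      if i < 4 && !(PySem.Chars.isdigit c) then false
      else if i == 4 && !(c == '/') then false
      else if 4 < i && !(PySem.Chars.isalpha c) then false
      else crmLoop s rest

def validate_crm_list (s : List Char) : Bool :=
  if s.length ≠ 7 then false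
  else if !(crmLoop s (PySem.List.pyRange 0 (s.length : Int) 1)) then false
  else
    match PySem.List.pyGet? s 5, PySem.List.pyGet? s 6 with
    | some c5, some c6 => if !(validate_uf_a [c5, c6]) then false else true
    | _, _ => false   -- unreachable at length 7

def validate_crm (crm : String) : Bool := validate_crm_list crm.toList

-- ===== PORT B =====
def ufSet : PySem.Set (List Char) := PySem.Set.ofList
  ["AC".toList, "AL".toList, "AP".toList, "AM".toList, "BA".toList, "CE".toList,
   "ES".toList, "GO".toList, "MA".toList, "MT".toList, "MS".toList, "MG".toList,
   "PA".toList, "PB".toList, "PR".toList, "PE".toList, "PI".toList, "RJ".toList,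
   "RN".toList, "RS".toList, "RO".toList, "RR".toList, "SC".toList, "SP".toList,
   "SE".toList, "TO".toList, "DF".toList]

def validate_uf_b (uf : List Char) : Bool :=
  ufSet.contains (PySem.Chars.upper uf)

-- Hand port of crm.partition with the slash separator (PySem has no partition): splits at its FIRST occurrence;
-- (before, found?, after) — found? = false models sep == '' in Python. Exact.
def partSlash : List Char → List Char × Bool × List Char
  | [] => ([], false, [])
  | c :: t =>
    if c = '/' then ([], true, t)
    else
      let (n, f, u) := partSlash t
      (c :: n, f, u)

def validate_crm_alt_list (s : List Char) : Bool :=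
  let (num, sep, uf) := partSlash s
  sep && (num.length == 4) && PySem.Chars.strIsdigit num && validate_uf_b uf

def validate_crm_alt (crm : String) : Bool := validate_crm_alt_list crm.toList

-- ===== PRECONDITION & SPEC =====
def Spec_validate_crm (crm : String) (out : Bool) : Prop := out = validate_crm_alt crm
instance (crm : String) (out : Bool) : Decidable (Spec_validate_crm crm out) := by unfold Spec_validate_crm; infer_instance

-- ===== CLAIM =====
def Claim_equal_validate_crm : Prop := ∀ (crm : String), Dom_validate_crm crm → Spec_validate_crm crm (validate_crm crm)

-- ===== LEMMAS AND PROOFS =====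

-- the common shape of an accepted string
def okShape (s : List Char) : Prop :=
  ∃ a b c d f g, s = [a, b, c, d, '/', f, g] ∧
    PySem.Chars.isdigit a = true ∧ PySem.Chars.isdigit b = true ∧
    PySem.Chars.isdigit c = true ∧ PySem.Chars.isdigit d = true ∧
    validate_uf_b [f, g] = true

theorem uf_ab (uf : List Char) : validate_uf_a uf = validate_uf_b uf := by
  have h : ufSet = estados_a := by rfl
  simp [validate_uf_a, validate_uf_b, h, PySem.Set.contains]

theorem uf_len {u : List Char} (h : validate_uf_b u = true) : u.length = 2 := by
  have hm : PySem.Chars.upper u ∈ ufSet := by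
    simpa [validate_uf_b, PySem.Set.contains] using h
  have h2 : ∀ x ∈ ufSet, x.length = 2 := by
    have : ufSet.all (fun x => x.length == 2) = true := by rfl
    simpa [List.all_eq_true] using this
  have := h2 _ hm
  simpa [PySem.Chars.upper] using this

theorem alpha_of_upper {c : Char} (h1 : 'A' ≤ PySem.Chars.upperChar c)
    (h2 : PySem.Chars.upperChar c ≤ 'Z') : PySem.Chars.isalpha c = true := by
  by_cases hl : PySem.Chars.islower c = true
  · simp [PySem.Chars.isalpha, hl]
  · simp [PySem.Chars.upperChar, hl] at h1 h2
    simp [PySem.Chars.isalpha, PySem.Chars.isupper, h1, h2]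

theorem uf_alpha {f g : Char} (h : validate_uf_b [f, g] = true) :
    PySem.Chars.isalpha f = true ∧ PySem.Chars.isalpha g = true := by
  have hm : PySem.Chars.upper [f, g] ∈ ufSet := by
    simpa [validate_uf_b, PySem.Set.contains] using h
  have h2 : ∀ x ∈ ufSet, ∀ c ∈ x, 'A' ≤ c ∧ c ≤ 'Z' := by
    have : ufSet.all (fun x => x.all (fun c => decide ('A' ≤ c) && decide (c ≤ 'Z'))) = true := by rfl
    simpa [List.all_eq_true] using this
  have hf := h2 _ hm (PySem.Chars.upperChar f) (by simp [PySem.Chars.upper])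
  have hg := h2 _ hm (PySem.Chars.upperChar g) (by simp [PySem.Chars.upper])
  exact ⟨alpha_of_upper hf.1 hf.2, alpha_of_upper hg.1 hg.2⟩

theorem digit_ne_slash {c : Char} (h : PySem.Chars.isdigit c = true) : c ≠ '/' := by
  rintro rfl; exact absurd h (by decide)

theorem pyRange7 : PySem.List.pyRange 0 7 1 = ([0, 1, 2, 3, 4, 5, 6] : List Int) := by decide

theorem part_found : ∀ {s n u : List Char}, partSlash s = (n, true, u) →
    s = n ++ '/' :: u ∧ '/' ∉ n := by
  intro s
  induction s with
  | nil => intro n u h; simp [partSlash] at h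
  | cons c t ih =>
    intro n u h
    by_cases hc : c = '/'
    · subst hc; simp [partSlash] at h; simp [h]
    · rcases hp : partSlash t with ⟨n', f', u'⟩
      simp [partSlash, hc, hp] at h
      obtain ⟨rfl, rfl, rfl⟩ := h
      obtain ⟨hs, hn⟩ := ih hp
      constructor
      · simp [hs]
      · simp [hn, Ne.symm hc]

theorem A_iff (s : List Char) : validate_crm_list s = true ↔ okShape s := by
  constructor
  · intro h
    unfold validate_crm_list at h
    by_cases hlen : s.length = 7
    · obtain ⟨a, b, c, d, e, f, g, rfl⟩ :
          ∃ a b c d e f g, s = [a, b, c, d, e, f, g] := by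
        rcases s with _ | ⟨a, s⟩; · simp at hlen
        rcases s with _ | ⟨b, s⟩; · simp at hlen
        rcases s with _ | ⟨c, s⟩; · simp at hlen
        rcases s with _ | ⟨d, s⟩; · simp at hlen
        rcases s with _ | ⟨e, s⟩; · simp at hlen
        rcases s with _ | ⟨f, s⟩; · simp at hlen
        rcases s with _ | ⟨g, s⟩; · simp at hlen
        rcases s with _ | ⟨x, s⟩
        · exact ⟨a, b, c, d, e, f, g, rfl⟩
        · simp at hlen
      norm_num at h
      simp [pyRange7, crmLoop, PySem.List.pyGet?, PySem.List.pyIdx?] at h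
      obtain ⟨⟨h1, h2, h3, h4, he, hf, hg⟩, huf⟩ := h
      exact ⟨a, b, c, d, f, g, by rw [he], h1, h2, h3, h4, (uf_ab [f, g]) ▸ huf⟩
    · simp [hlen] at h
  · rintro ⟨a, b, c, d, f, g, rfl, h1, h2, h3, h4, h5⟩
    obtain ⟨hf, hg⟩ := uf_alpha h5
    unfold validate_crm_list
    have h5' : validate_uf_a [f, g] = true := (uf_ab [f, g]).symm ▸ h5
    norm_num
    simp [pyRange7, crmLoop, PySem.List.pyGet?, PySem.List.pyIdx?,
          h1, h2, h3, h4, hf, hg, h5']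

theorem B_iff (s : List Char) : validate_crm_alt_list s = true ↔ okShape s := by
  constructor
  · intro h
    unfold validate_crm_alt_list at h
    rcases hp : partSlash s with ⟨n, fd, u⟩
    rw [hp] at h
    simp only [Bool.and_eq_true, beq_iff_eq] at h
    obtain ⟨⟨⟨hfd, hlen⟩, hdig⟩, huf⟩ := h
    cases fd
    · simp at hfd
    · obtain ⟨rfl, -⟩ := part_found hp
      obtain ⟨a, b, c, d, rfl⟩ : ∃ a b c d, n = [a, b, c, d] := by
        rcases n with _ | ⟨a, n⟩; · simp at hlen
        rcases n with _ | ⟨b, n⟩; · simp at hlen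
        rcases n with _ | ⟨c, n⟩; · simp at hlen
        rcases n with _ | ⟨d, n⟩; · simp at hlen
        rcases n with _ | ⟨x, n⟩
        · exact ⟨a, b, c, d, rfl⟩
        · simp at hlen
      obtain ⟨f, g, rfl⟩ : ∃ f g, u = [f, g] := by
        have := uf_len huf
        rcases u with _ | ⟨f, u⟩; · simp at this
        rcases u with _ | ⟨g, u⟩; · simp at this
        rcases u with _ | ⟨x, u⟩
        · exact ⟨f, g, rfl⟩
        · simp at this
      simp [PySem.Chars.strIsdigit] at hdig
      exact ⟨a, b, c, d, f, g, rfl, hdig.1, hdig.2.1, hdig.2.2.1, hdig.2.2.2, huf⟩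
  · rintro ⟨a, b, c, d, f, g, rfl, h1, h2, h3, h4, h5⟩
    unfold validate_crm_alt_list
    simp [partSlash, digit_ne_slash h1, digit_ne_slash h2, digit_ne_slash h3,
          digit_ne_slash h4, PySem.Chars.strIsdigit, h1, h2, h3, h4, h5]

-- ===== VERDICT =====
theorem validate_crm_spec : Claim_equal_validate_crm := by
  intro crm _
  unfold Spec_validate_crm validate_crm validate_crm_alt
  rw [Bool.eq_iff_iff, A_iff, B_iff]
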